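-- pv_equiv track=rewrite | github.com/meelgroup/barbarik | interfaces/weightcount/WeightCount.py | EncodeCNF
-- ===== SOURCE A (Python) =====
-- def pushVar(variable, cnfClauses):
--     cnfLen = len(cnfClauses)
--     for i in range(cnfLen):
--         cnfClauses[i].append(variable)
--     return cnfClauses
--
-- def getCNF(variable, binStr, sign, origTotalVars):
--     cnfClauses = []
--     binLen = len(binStr)
--     cnfClauses.append([binLen + 1 + origTotalVars])
--     for i in range(binLen):
--         newVar = binLen - i + origTotalVars
--         if sign == False:
--             newVar = -1 * (binLen - i + origTotalVars)
--         if binStr[binLen - i - 1] == "0":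
--             cnfClauses.append([newVar])
--         else:
--             cnfClauses = pushVar(newVar, cnfClauses)
--     pushVar(variable, cnfClauses)
--     return cnfClauses
--
-- def EncodeCNF(
--     variable, kWeight, iWeight, origtotalVars, origtotalClaus, independentSet, precision
-- ):
--     writeLines = ""
--     totalVars = origtotalVars + iWeight
--     totalClaus = origtotalClaus
--     independentSet[origtotalVars] = 1
--     binStr = str(bin(int(kWeight)))[2:-1]
--     binLen = len(binStr)
--     for i in range(iWeight - binLen - 1):
--         binStr = "0" + binStr
--     for i in range(iWeight - 1):
--         independentSet[origtotalVars + i + 1] = 1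
--     complementStr = ""
--     for i in range(len(binStr)):
--         if binStr[i] == "0":
--             complementStr += "1"
--         else:
--             complementStr += "0"
--     origCNFClauses = getCNF(-variable, binStr, True, origtotalVars)
--
--     for i in range(len(origCNFClauses)):
--         totalClaus += 1
--         for j in range(len(origCNFClauses[i])):
--             writeLines += str(origCNFClauses[i][j]) + " "
--         writeLines += "0\n"
--     cnfClauses = getCNF(variable, complementStr, False, origtotalVars)
--     for i in range(len(cnfClauses)):
--         if cnfClauses[i] in origCNFClauses:
--             continue
--         totalClaus += 1
--         for j in range(len(cnfClauses[i])):
--             writeLines += str(cnfClauses[i][j]) + " "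
--         writeLines += "0\n"
--     return writeLines, totalVars, totalClaus, independentSet
-- ===== SOURCE B (Python) =====
-- def EncodeCNF(
--     variable, kWeight, iWeight, origtotalVars, origtotalClaus, independentSet, precision
-- ):
--     totalVars = origtotalVars + iWeight
--     independentSet[origtotalVars] = 1
--     raw = str(bin(int(kWeight)))[2:-1]
--     binStr = "0" * max(0, iWeight - len(raw) - 1) + raw
--     for i in range(iWeight - 1):
--         independentSet[origtotalVars + i + 1] = 1
--     complementStr = "".join("1" if c == "0" else "0" for c in binStr)
--
--     def clauses(s, sgn, v):
--         # Build each clause directly: clause 0 is the top var plus all '1'-bit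
--         # vars (LSB->MSB) plus v; each '0' bit at position i contributes a clause
--         # of its own var, the '1'-bit vars above it, and v.
--         n = len(s)
--         ones = [
--             sgn * (n - i + origtotalVars)
--             for i in range(n)
--             if s[n - i - 1] != "0"
--         ]
--         out = [[n + 1 + origtotalVars] + ones + [v]]
--         seen = 0
--         for i in range(n):
--             if s[n - i - 1] != "0":
--                 seen += 1
--             else:
--                 out.append([sgn * (n - i + origtotalVars)] + ones[seen:] + [v])
--         return out
--
--     orig = clauses(binStr, 1, -variable)
--     comp = clauses(complementStr, -1, variable)
--     kept = [cl for cl in comp if cl not in orig]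
--     emit = lambda cl: "".join(str(x) + " " for x in cl) + "0\n"
--     writeLines = "".join(emit(cl) for cl in orig) + "".join(emit(cl) for cl in kept)
--     totalClaus = origtotalClaus + len(orig) + len(kept)
--     return writeLines, totalVars, totalClaus, independentSet
-- ===== Notes on version B (the rewrite author's own statement) =====
-- stated objective: alternative
-- what changed: Clause construction no longer appends each new '1'-bit variable to every clause built so far (A's pushVar quadratic accumulation): B precomputes the list of '1'-bit variables once and emits every clause directly as its own prefix plus a suffix slice of that list, and the output string/clause count are built by comprehensions over the clause lists instead of stateful accumulation loops.
import Mathlib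
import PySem

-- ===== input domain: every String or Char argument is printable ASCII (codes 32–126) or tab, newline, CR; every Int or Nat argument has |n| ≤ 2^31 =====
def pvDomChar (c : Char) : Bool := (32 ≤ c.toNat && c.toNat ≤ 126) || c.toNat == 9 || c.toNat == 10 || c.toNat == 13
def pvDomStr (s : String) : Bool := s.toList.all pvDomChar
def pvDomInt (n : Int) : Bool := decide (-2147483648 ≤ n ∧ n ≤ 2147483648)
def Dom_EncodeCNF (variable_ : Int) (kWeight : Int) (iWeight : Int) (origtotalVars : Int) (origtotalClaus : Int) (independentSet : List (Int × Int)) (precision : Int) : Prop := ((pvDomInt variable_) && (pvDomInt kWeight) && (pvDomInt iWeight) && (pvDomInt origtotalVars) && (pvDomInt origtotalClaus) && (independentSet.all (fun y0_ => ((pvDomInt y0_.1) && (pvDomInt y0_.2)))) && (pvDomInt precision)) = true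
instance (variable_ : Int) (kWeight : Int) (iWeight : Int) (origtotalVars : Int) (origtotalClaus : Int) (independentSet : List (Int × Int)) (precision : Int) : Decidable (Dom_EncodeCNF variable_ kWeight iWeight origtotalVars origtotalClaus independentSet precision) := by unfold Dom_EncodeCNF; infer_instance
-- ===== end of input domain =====

-- B replaces A's quadratic append-to-every-clause accumulation by direct clause construction
-- from a precomputed list of '1'-bit variables (objective: alternative decomposition, same results).
-- Both ports transliterate their Python; strings are carried as List Char (ASCII-exact) and turned
-- into String at the return; the dict argument is handled as PySem.Dict identically on both sides.

-- ===== PORT A =====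
-- for i in range(len(cnfClauses)): cnfClauses[i].append(variable)  — appends variable to every clause
def pushVar (variable_ : Int) (cnfClauses : List (List Int)) : List (List Int) :=
  cnfClauses.map (fun c => c ++ [variable_])

def getCNF (variable_ : Int) (binStr : List Char) (sign : Bool) (origTotalVars : Int) : List (List Int) :=
  let binLen := binStr.length
  let cnfClauses : List (List Int) := [[(binLen : Int) + 1 + origTotalVars]]
  let cnfClauses := (List.range binLen).foldl (fun cnfClauses (i : Nat) =>
      let newVar : Int := (binLen : Int) - (i : Int) + origTotalVars
      let newVar := if sign = false then -1 * ((binLen : Int) - (i : Int) + origTotalVars) else newVar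
      -- binStr[binLen - i - 1]: always in range (i < binLen), so getD is exact
      if binStr.getD (binLen - i - 1) ' ' = '0' then cnfClauses ++ [[newVar]]
      else pushVar newVar cnfClauses) cnfClauses
  pushVar variable_ cnfClauses

def EncodeCNF (variable_ : Int) (kWeight : Int) (iWeight : Int) (origtotalVars : Int) (origtotalClaus : Int) (independentSet : List (Int × Int)) (precision : Int) : String × Int × Int × (List (Int × Int)) :=
  let writeLines : List Char := []
  let totalVars := origtotalVars + iWeight
  let totalClaus := origtotalClaus
  let indep := (PySem.Dict.ofList independentSet).insert origtotalVars 1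
  -- str(bin(int(kWeight)))[2:-1]
  let binStr := PySem.List.slice (PySem.Int.toBinChars0b kWeight) (some 2) (some (-1))
  let binLen := binStr.length
  let binStr := (PySem.List.pyRange 0 (iWeight - (binLen : Int) - 1) 1).foldl (fun s _ => '0' :: s) binStr
  let indep := (PySem.List.pyRange 0 (iWeight - 1) 1).foldl (fun d i => d.insert (origtotalVars + i + 1) 1) indep
  let complementStr := (List.range binStr.length).foldl (fun acc i =>
      if binStr.getD i ' ' = '0' then acc ++ ['1'] else acc ++ ['0']) ([] : List Char)
  let origCNFClauses := getCNF (-variable_) binStr true origtotalVars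
  let st := origCNFClauses.foldl (fun (st : List Char × Int) cl =>
      ((cl.foldl (fun w x => w ++ (PySem.Int.toChars x ++ [' '])) st.1) ++ ['0', '\n'], st.2 + 1))
      (writeLines, totalClaus)
  let cnfClauses := getCNF variable_ complementStr false origtotalVars
  let st := cnfClauses.foldl (fun (st : List Char × Int) cl =>
      if cl ∈ origCNFClauses then st
      else ((cl.foldl (fun w x => w ++ (PySem.Int.toChars x ++ [' '])) st.1) ++ ['0', '\n'], st.2 + 1)) st
  (String.ofList st.1, totalVars, st.2, indep.items)

-- ===== PORT B =====
def clausesAlt (s : List Char) (sgn : Int) (v : Int) (origtotalVars : Int) : List (List Int) :=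
  let n := s.length
  let ones := (List.range n).filterMap (fun i =>
      if s.getD (n - i - 1) ' ' ≠ '0' then some (sgn * ((n : Int) - (i : Int) + origtotalVars)) else none)
  let out : List (List Int) := [((n : Int) + 1 + origtotalVars) :: (ones ++ [v])]
  let st := (List.range n).foldl (fun (st : List (List Int) × Nat) (i : Nat) =>
      if s.getD (n - i - 1) ' ' ≠ '0' then (st.1, st.2 + 1)
      else (st.1 ++ [(sgn * ((n : Int) - (i : Int) + origtotalVars)) :: (ones.drop st.2 ++ [v])], st.2)) (out, 0)
  st.1

def emitAlt (cl : List Int) : List Char :=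
  cl.flatMap (fun x => PySem.Int.toChars x ++ [' ']) ++ ['0', '\n']

def EncodeCNF_alt (variable_ : Int) (kWeight : Int) (iWeight : Int) (origtotalVars : Int) (origtotalClaus : Int) (independentSet : List (Int × Int)) (precision : Int) : String × Int × Int × (List (Int × Int)) :=
  let totalVars := origtotalVars + iWeight
  let indep := (PySem.Dict.ofList independentSet).insert origtotalVars 1
  let raw := PySem.List.slice (PySem.Int.toBinChars0b kWeight) (some 2) (some (-1))
  let binStr := List.replicate (max 0 (iWeight - (raw.length : Int) - 1)).toNat '0' ++ raw
  let indep := (PySem.List.pyRange 0 (iWeight - 1) 1).foldl (fun d i => d.insert (origtotalVars + i + 1) 1) indep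
  let complementStr := binStr.map (fun c => if c = '0' then '1' else '0')
  let orig := clausesAlt binStr 1 (-variable_) origtotalVars
  let comp := clausesAlt complementStr (-1) variable_ origtotalVars
  let kept := comp.filter (fun cl => decide (cl ∉ orig))
  let writeLines := orig.flatMap emitAlt ++ kept.flatMap emitAlt
  let totalClaus := origtotalClaus + (orig.length : Int) + (kept.length : Int)
  (String.ofList writeLines, totalVars, totalClaus, indep.items)

-- ===== PRECONDITION & SPEC =====
def Spec_EncodeCNF (variable_ : Int) (kWeight : Int) (iWeight : Int) (origtotalVars : Int) (origtotalClaus : Int) (independentSet : List (Int × Int)) (precision : Int) (out : String × Int × Int × (List (Int × Int))) : Prop := out = EncodeCNF_alt variable_ kWeight iWeight origtotalVars origtotalClaus independentSet precision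
instance (variable_ : Int) (kWeight : Int) (iWeight : Int) (origtotalVars : Int) (origtotalClaus : Int) (independentSet : List (Int × Int)) (precision : Int) (out : String × Int × Int × (List (Int × Int))) : Decidable (Spec_EncodeCNF variable_ kWeight iWeight origtotalVars origtotalClaus independentSet precision out) := by unfold Spec_EncodeCNF; infer_instance

-- ===== CLAIM (what is proved, stated in full; the proofs are below) =====
def Claim_equal_EncodeCNF : Prop := ∀ (variable_ : Int) (kWeight : Int) (iWeight : Int) (origtotalVars : Int) (origtotalClaus : Int) (independentSet : List (Int × Int)) (precision : Int), Dom_EncodeCNF variable_ kWeight iWeight origtotalVars origtotalClaus independentSet precision → Spec_EncodeCNF variable_ kWeight iWeight origtotalVars origtotalClaus independentSet precision (EncodeCNF variable_ kWeight iWeight origtotalVars origtotalClaus independentSet precision)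

-- ===== LEMMAS AND PROOFS =====

-- the '1'-bit variables contributed by the indices `is` (in order)
def wOnes (p : Nat → Prop) [DecidablePred p] (w : Nat → Int) (is : List Nat) : List Int :=
  is.filterMap (fun i => if p i then some (w i) else none)

-- the clauses opened by '0' bits: each carries its own variable plus the later '1'-bit variables
def wZeros (p : Nat → Prop) [DecidablePred p] (w : Nat → Int) : List Nat → List (List Int)
  | [] => []
  | i :: is => if p i then wZeros p w is else (w i :: wOnes p w is) :: wZeros p w is

theorem wOnes_cons (p : Nat → Prop) [DecidablePred p] (w : Nat → Int) (i : Nat) (is : List Nat) :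
    wOnes p w (i :: is) = if p i then w i :: wOnes p w is else wOnes p w is := by
  simp only [wOnes, List.filterMap_cons]
  split <;> simp_all

theorem wOnes_congr (p : Nat → Prop) [DecidablePred p] (w1 w2 : Nat → Int)
    (h : ∀ i, w1 i = w2 i) (is : List Nat) : wOnes p w1 is = wOnes p w2 is := by
  induction is with
  | nil => rfl
  | cons i is ih => by_cases hp : p i <;> simp [wOnes_cons, hp, ih, h i]

theorem wZeros_congr (p : Nat → Prop) [DecidablePred p] (w1 w2 : Nat → Int)
    (h : ∀ i, w1 i = w2 i) (is : List Nat) : wZeros p w1 is = wZeros p w2 is := by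
  induction is with
  | nil => rfl
  | cons i is ih =>
      by_cases hp : p i <;> simp [wZeros, hp, ih, h i, wOnes_congr p w1 w2 h]

-- A's accumulation loop: clauses so far get all later '1'-bit vars appended; '0' bits open new clauses
theorem afold_eq (p : Nat → Prop) [DecidablePred p] (w : Nat → Int) :
    ∀ (is : List Nat) (cs : List (List Int)),
      is.foldl (fun cs i => if p i then cs.map (fun c => c ++ [w i]) else cs ++ [[w i]]) cs
        = cs.map (fun c => c ++ wOnes p w is) ++ wZeros p w is := by
  intro is
  induction is with
  | nil => intro cs; simp [wOnes, wZeros]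
  | cons i is ih =>
      intro cs
      by_cases hp : p i <;>
        simp [hp, ih, wOnes_cons, wZeros, List.map_map, Function.comp_def, List.append_assoc]

-- B's direct pass: the counter k always points past the '1'-bit vars already consumed
theorem bfold_eq (p : Nat → Prop) [DecidablePred p] (w : Nat → Int) (v : Int) (full : List Int) :
    ∀ (is : List Nat) (acc : List (List Int)) (k : Nat), full.drop k = wOnes p w is →
      (is.foldl (fun (st : List (List Int) × Nat) (i : Nat) =>
          if p i then (st.1, st.2 + 1)
          else (st.1 ++ [w i :: (full.drop st.2 ++ [v])], st.2)) (acc, k)).1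
        = acc ++ (wZeros p w is).map (fun c => c ++ [v]) := by
  intro is
  induction is with
  | nil => intro acc k _; simp [wZeros]
  | cons i is ih =>
      intro acc k hk
      rw [wOnes_cons] at hk
      by_cases hp : p i
      · simp only [List.foldl_cons, hp, if_pos]
        rw [if_pos hp] at hk
        have hdrop : full.drop (k + 1) = wOnes p w is := by
          have : full.drop (k + 1) = (full.drop k).drop 1 := by
            rw [List.drop_drop]
          rw [this, hk]; rfl
        rw [ih acc (k + 1) hdrop]
        simp [wZeros, hp]
      · rw [if_neg hp] at hk
        simp only [List.foldl_cons, hp, if_false]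
        rw [ih (acc ++ [w i :: (full.drop k ++ [v])]) k hk]
        simp [wZeros, hp, hk, List.append_assoc]

-- canonical form shared by both clause builders
theorem clausesAlt_canon (s : List Char) (sgn v V : Int) :
    clausesAlt s sgn v V =
      (((s.length : Int) + 1 + V) ::
        (wOnes (fun i => s.getD (s.length - i - 1) ' ' ≠ '0')
          (fun i => sgn * ((s.length : Int) - (i : Int) + V)) (List.range s.length) ++ [v])) ::
      (wZeros (fun i => s.getD (s.length - i - 1) ' ' ≠ '0')
          (fun i => sgn * ((s.length : Int) - (i : Int) + V)) (List.range s.length)).map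
        (fun c => c ++ [v]) := by
  simp only [clausesAlt]
  rw [show ((List.range s.length).filterMap (fun i =>
      if s.getD (s.length - i - 1) ' ' ≠ '0' then some (sgn * ((s.length : Int) - (i : Int) + V)) else none))
      = wOnes (fun i => s.getD (s.length - i - 1) ' ' ≠ '0')
          (fun i => sgn * ((s.length : Int) - (i : Int) + V)) (List.range s.length) from rfl]
  rw [bfold_eq _ _ v _ (List.range s.length) _ 0 (by rw [List.drop_zero])]
  simp

theorem getCNF_canon (s : List Char) (sign : Bool) (v V : Int) :
    getCNF v s sign V =
      (((s.length : Int) + 1 + V) ::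
        (wOnes (fun i => s.getD (s.length - i - 1) ' ' ≠ '0')
          (fun i => if sign = false then -1 * ((s.length : Int) - (i : Int) + V)
                    else (s.length : Int) - (i : Int) + V) (List.range s.length) ++ [v])) ::
      (wZeros (fun i => s.getD (s.length - i - 1) ' ' ≠ '0')
          (fun i => if sign = false then -1 * ((s.length : Int) - (i : Int) + V)
                    else (s.length : Int) - (i : Int) + V) (List.range s.length)).map
        (fun c => c ++ [v]) := by
  simp only [getCNF, pushVar]
  rw [PySem.List.foldl_congr_mem (List.range s.length) _
    (fun cs i => if s.getD (s.length - i - 1) ' ' ≠ '0'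
        then cs.map (fun c => c ++ [if sign = false then -1 * ((s.length : Int) - (i : Int) + V)
                                    else (s.length : Int) - (i : Int) + V])
        else cs ++ [[if sign = false then -1 * ((s.length : Int) - (i : Int) + V)
                     else (s.length : Int) - (i : Int) + V]]) _
    (by intro acc i _; by_cases h : s.getD (s.length - i - 1) ' ' = '0' <;> simp [h])]
  rw [afold_eq (fun i => s.getD (s.length - i - 1) ' ' ≠ '0') _ (List.range s.length)]
  simp

theorem getCNF_true (s : List Char) (v V : Int) : getCNF v s true V = clausesAlt s 1 v V := by
  rw [getCNF_canon, clausesAlt_canon]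
  have h : ∀ i : Nat, (1 : Int) * ((s.length : Int) - (i : Int) + V)
      = if (true : Bool) = false then -1 * ((s.length : Int) - (i : Int) + V)
        else (s.length : Int) - (i : Int) + V := by intro i; simp
  rw [wOnes_congr _ _ _ h, wZeros_congr _ _ _ h]

theorem getCNF_false (s : List Char) (v V : Int) : getCNF v s false V = clausesAlt s (-1) v V := by
  rw [getCNF_canon, clausesAlt_canon]
  have h : ∀ i : Nat, (-1 : Int) * ((s.length : Int) - (i : Int) + V)
      = if (false : Bool) = false then -1 * ((s.length : Int) - (i : Int) + V)
        else (s.length : Int) - (i : Int) + V := by intro i; simp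
  rw [wOnes_congr _ _ _ h, wZeros_congr _ _ _ h]

-- the zero-padding loop prepends one '0' per iteration
theorem pad_eq (m : Int) (s : List Char) :
    (PySem.List.pyRange 0 m 1).foldl (fun s _ => '0' :: s) s
      = List.replicate (max 0 m).toNat '0' ++ s := by
  have hlen : (PySem.List.pyRange 0 m 1).length = (max 0 m).toNat := by
    rw [PySem.List.length_pyRange_one]; omega
  rw [← hlen]
  generalize (PySem.List.pyRange 0 m 1) = l
  induction l generalizing s with
  | nil => simp
  | cons x l ih =>
      rw [List.foldl_cons, ih]
      simp [List.replicate_succ']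

-- the complement loop is a map over the characters
theorem range_map_getD (s : List Char) (f : Char → Char) (d : Char) :
    (List.range s.length).map (fun i => f (s.getD i d)) = s.map f := by
  apply List.ext_getElem
  · simp
  · intro i h1 h2
    simp only [List.getElem_map, List.getElem_range]
    rw [List.getD_eq_getElem s d (by simpa using h1)]

theorem comp_eq (s : List Char) :
    (List.range s.length).foldl (fun acc i =>
        if s.getD i ' ' = '0' then acc ++ ['1'] else acc ++ ['0']) ([] : List Char)
      = s.map (fun c => if c = '0' then '1' else '0') := by
  rw [PySem.List.foldl_congr_mem (List.range s.length) _
    (fun acc i => acc ++ [if s.getD i ' ' = '0' then '1' else '0']) _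
    (by intro acc i _; by_cases h : s.getD i ' ' = '0' <;> simp_all)]
  rw [PySem.List.foldl_append_eq_flatMap (fun i => [if s.getD i ' ' = '0' then '1' else '0'])]
  rw [List.nil_append, ← List.map_eq_flatMap]
  exact range_map_getD s (fun c => if c = '0' then '1' else '0') ' '

-- A's first emission loop equals a flatMap plus a length count
theorem emit_all (cls : List (List Int)) (w0 : List Char) (c0 : Int) :
    cls.foldl (fun (st : List Char × Int) cl =>
        ((cl.foldl (fun w x => w ++ (PySem.Int.toChars x ++ [' '])) st.1) ++ ['0', '\n'], st.2 + 1))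
        (w0, c0)
      = (w0 ++ cls.flatMap emitAlt, c0 + (cls.length : Int)) := by
  induction cls generalizing w0 c0 with
  | nil => simp
  | cons cl cls ih =>
      rw [List.foldl_cons, ih]
      rw [PySem.List.foldl_append_eq_flatMap (fun x => PySem.Int.toChars x ++ [' '])]
      simp [emitAlt, List.append_assoc]
      omega

-- A's second emission loop equals a flatMap over the clauses not in orig
theorem emit_skip (orig : List (List Int)) (cls : List (List Int)) (w0 : List Char) (c0 : Int) :
    cls.foldl (fun (st : List Char × Int) cl =>
        if cl ∈ orig then st
        else ((cl.foldl (fun w x => w ++ (PySem.Int.toChars x ++ [' '])) st.1) ++ ['0', '\n'], st.2 + 1))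
        (w0, c0)
      = (w0 ++ (cls.filter (fun cl => decide (cl ∉ orig))).flatMap emitAlt,
         c0 + ((cls.filter (fun cl => decide (cl ∉ orig))).length : Int)) := by
  induction cls generalizing w0 c0 with
  | nil => simp
  | cons cl cls ih =>
      by_cases h : cl ∈ orig
      · rw [List.foldl_cons, if_pos h, ih]
        simp [h]
      · rw [List.foldl_cons, if_neg h, ih]
        rw [PySem.List.foldl_append_eq_flatMap (fun x => PySem.Int.toChars x ++ [' '])]
        simp [h, emitAlt, List.append_assoc]
        omega

-- ===== VERDICT (by name: the statement is the Claim_ definition above) =====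
theorem EncodeCNF_spec : Claim_equal_EncodeCNF := by
  intro variable_ kWeight iWeight origtotalVars origtotalClaus independentSet precision _
  show _ = _
  simp only [EncodeCNF, EncodeCNF_alt]
  rw [pad_eq, comp_eq, getCNF_true, getCNF_false, emit_all, emit_skip]
  simp
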